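-- pv_equiv track=rewrite | github.com/zockerhuhn/pythondecryptstuff | main-1-2-1-1.py | caeserrek
-- ===== SOURCE A (Python) =====
-- def caeserrek(original, verschiebung, rekursion, decryptrekursion):
--     result = ""
--     if rekursion == 0:
--         try:
--             for x in range(26):
--                 verschiebung2 = verschiebung
--                 #result = ""
--                 for i in range(len(original)):
--                     char = original[i]
--                     if char.isupper():
--                         result += chr((ord(char) + verschiebung2-65) % 26 + 65)
--                     else:
--                         result += chr((ord(char) + verschiebung2-97) % 26 + 97)
--                     if decryptrekursion:
--                         verschiebung2 += -rekursion
--                     else: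
--                         verschiebung2 += rekursion
--                 rekursion += 1
--                 result += "\n"
--         except:
--             pass
--     else:
--         for i in range(len(original)):
--             char = original[i]
--             if char.isupper():
--                 result += chr((ord(char) + verschiebung-65) % 26 + 65)
--             else:
--                 result += chr((ord(char) + verschiebung-97) % 26 + 97)
--             if not rekursion == None:
--                 if decryptrekursion:
--                     verschiebung += -rekursion
--                 else:
--                     verschiebung += rekursion
--     return result
-- ===== SOURCE B (Python) =====
-- def caeserrek(original, verschiebung, rekursion, decryptrekursion):
--     # rotate a character by k within its case band (base 97 for any non-upper char)
--     def rot(ch, k):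
--         base = 65 if ch.isupper() else 97
--         return chr((ord(ch) - base + k) % 26 + base)
--
--     if rekursion == 0:
--         # dynamic programming across the 26 rows: row r+1 is obtained from row r
--         # by rotating its character at index i by sign*i (rotations compose).
--         sign = -1 if decryptrekursion else 1
--         row = [rot(ch, verschiebung) for ch in original]  # row 0
--         out = []
--         for _ in range(26):
--             out.append("".join(row))
--             out.append("\n")
--             row = [rot(ch, sign * i) for i, ch in enumerate(row)]
--         return "".join(out)
--     # two staged passes: uniform shift first, then the progressive correction
--     step = 0 if rekursion is None else (-rekursion if decryptrekursion else rekursion)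
--     shifted = [rot(ch, verschiebung) for ch in original]
--     return "".join(rot(ch, step * i) for i, ch in enumerate(shifted))
-- ===== Notes on version B (the rewrite author's own statement) =====
-- stated objective: alternative
-- what changed: Replaces A's recompute-every-row nested loops and mutated running-shift accumulators by a dynamic-programming scheme: row 0 is a uniform rotation of the input, each of the following 25 rows is derived from the previous row in place by rotating its i-th character by sign*i (rotations compose), and the single-line branch becomes two staged passes (uniform shift, then progressive correction).
import Mathlib
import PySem

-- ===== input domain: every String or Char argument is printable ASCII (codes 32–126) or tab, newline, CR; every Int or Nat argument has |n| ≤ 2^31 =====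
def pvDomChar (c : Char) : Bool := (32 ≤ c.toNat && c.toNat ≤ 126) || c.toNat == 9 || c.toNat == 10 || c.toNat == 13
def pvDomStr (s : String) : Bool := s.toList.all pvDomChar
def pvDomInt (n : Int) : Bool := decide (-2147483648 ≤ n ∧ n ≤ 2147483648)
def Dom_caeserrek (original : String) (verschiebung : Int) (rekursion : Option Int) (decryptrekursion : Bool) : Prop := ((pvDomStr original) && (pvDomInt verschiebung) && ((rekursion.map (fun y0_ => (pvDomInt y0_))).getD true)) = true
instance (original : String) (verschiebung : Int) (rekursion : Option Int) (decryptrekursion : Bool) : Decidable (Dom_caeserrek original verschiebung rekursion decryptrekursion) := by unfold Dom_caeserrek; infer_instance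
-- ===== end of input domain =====

-- B replaces A's recompute-every-row nested loops with a DP across the 26 rows (each row derived from the previous one by composing rotations) and two staged passes in the single-line branch; same cost, different algorithm.
-- ===== PORT A =====
def pvShiftChar (c : Char) (s : Int) : Char :=
  if PySem.Chars.isupper c then
    Char.ofNat ((PySem.Int.mod ((c.toNat : Int) + s - 65) 26 + 65).toNat)
  else
    Char.ofNat ((PySem.Int.mod ((c.toNat : Int) + s - 97) 26 + 97).toNat)

-- literal port of A: nested loops, mutated `result`/`verschiebung2`/`rekursion` state
def caeserrek (original : String) (verschiebung : Int) (rekursion : Option Int) (decryptrekursion : Bool) : String :=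
  if rekursion = some 0 then
    let st := (List.range 26).foldl (fun (st : List Char × Int) _ =>
      let inner := original.toList.foldl (fun (st2 : List Char × Int) c =>
        (st2.1 ++ [pvShiftChar c st2.2],
          if decryptrekursion then st2.2 + (-st.2) else st2.2 + st.2)) (st.1, verschiebung)
      (inner.1 ++ ['\n'], st.2 + 1)) ([], 0)
    String.ofList st.1
  else
    String.ofList ((original.toList.foldl (fun (st2 : List Char × Int) c =>
      (st2.1 ++ [pvShiftChar c st2.2],
        match rekursion with
        | none => st2.2
        | some k => if decryptrekursion then st2.2 + (-k) else st2.2 + k)) ([], verschiebung)).1)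

-- ===== PORT B =====
-- B helper: rotate a character by k within its case band (base 97 for non-upper chars)
def pvRot (c : Char) (k : Int) : Char :=
  if PySem.Chars.isupper c then
    Char.ofNat ((PySem.Int.mod ((c.toNat : Int) - 65 + k) 26 + 65).toNat)
  else
    Char.ofNat ((PySem.Int.mod ((c.toNat : Int) - 97 + k) 26 + 97).toNat)

-- port of B: row 0 by a uniform rotation, then each next row derived from the previous row
def caeserrek_alt (original : String) (verschiebung : Int) (rekursion : Option Int) (decryptrekursion : Bool) : String :=
  if rekursion = some 0 then
    let sign : Int := if decryptrekursion then -1 else 1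
    let row0 := original.toList.map (fun c => pvRot c verschiebung)
    let st := (List.range 26).foldl (fun (st : List Char × List Char) _ =>
      (st.1 ++ st.2 ++ ['\n'],
       (PySem.List.enumerate st.2).map (fun p => pvRot p.2 (sign * p.1)))) ([], row0)
    String.ofList st.1
  else
    let step : Int := match rekursion with
      | none => 0
      | some k => if decryptrekursion then -k else k
    let shifted := original.toList.map (fun c => pvRot c verschiebung)
    String.ofList ((PySem.List.enumerate shifted).map (fun p => pvRot p.2 (step * p.1)))

-- ===== PRECONDITION & SPEC =====
def Spec_caeserrek (original : String) (verschiebung : Int) (rekursion : Option Int) (decryptrekursion : Bool) (out : String) : Prop := out = caeserrek_alt original verschiebung rekursion decryptrekursion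
instance (original : String) (verschiebung : Int) (rekursion : Option Int) (decryptrekursion : Bool) (out : String) : Decidable (Spec_caeserrek original verschiebung rekursion decryptrekursion out) := by unfold Spec_caeserrek; infer_instance

-- ===== CLAIM (what is proved, stated in full; the proofs are below) =====
def Claim_equal_caeserrek : Prop := ∀ (original : String) (verschiebung : Int) (rekursion : Option Int) (decryptrekursion : Bool), Dom_caeserrek original verschiebung rekursion decryptrekursion → Spec_caeserrek original verschiebung rekursion decryptrekursion (caeserrek original verschiebung rekursion decryptrekursion)

-- ===== LEMMAS AND PROOFS =====

-- the line with per-index shift v + d*i, written with B's rotation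
def pvLineP (cs : List Char) (v d : Int) : List Char :=
  (PySem.List.enumerate cs).map (fun p => pvRot p.2 (v + d * p.1))

-- rows that the 26-row loop produces, starting at row counter k, with per-row step sign*k
def pvRowsP (cs : List Char) (v sign : Int) : Int → Nat → List Char
  | _, 0 => []
  | k, n+1 => (pvLineP cs v (sign * k) ++ ['\n']) ++ pvRowsP cs v sign (k+1) n

-- char-level facts
theorem pv_toNat_ofNat (n : Nat) (h : n < 55296) : (Char.ofNat n).toNat = n := by
  have hv : n.isValidChar := Or.inl h
  simp [Char.ofNat, hv, Char.ofNatAux, Char.toNat]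

theorem pv_char_le_iff (a b : Char) : (a ≤ b) ↔ a.toNat ≤ b.toNat := by
  rw [Char.le_def, UInt32.le_iff_toNat_le]; rfl

theorem pv_isupper_ofNat (n : Nat) (h1 : 65 ≤ n) (h2 : n ≤ 90) :
    PySem.Chars.isupper (Char.ofNat n) = true := by
  unfold PySem.Chars.isupper
  have ht := pv_toNat_ofNat n (by omega)
  simp only [Bool.and_eq_true, decide_eq_true_eq, pv_char_le_iff, ht]
  exact ⟨h1, h2⟩

theorem pv_islower_ofNat (n : Nat) (h1 : 97 ≤ n) (h2 : n ≤ 122) :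
    PySem.Chars.isupper (Char.ofNat n) = false := by
  unfold PySem.Chars.isupper
  have ht := pv_toNat_ofNat n (by omega)
  have hz : ('Z').toNat = 90 := rfl
  simp only [Bool.and_eq_false_iff, decide_eq_false_iff_not, pv_char_le_iff, ht, hz]
  right; omega

theorem pv_mod26 (x : Int) : 0 ≤ PySem.Int.mod x 26 ∧ PySem.Int.mod x 26 < 26 := by
  rw [PySem.Int.mod_eq_emod_of_pos (by norm_num)]
  exact ⟨Int.emod_nonneg x (by norm_num), Int.emod_lt_of_pos x (by norm_num)⟩

-- rotations compose
theorem pvRot_comp (c : Char) (a b : Int) : pvRot (pvRot c a) b = pvRot c (a + b) := by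
  unfold pvRot
  by_cases h : PySem.Chars.isupper c = true
  · simp only [h, if_true]
    have hm := pv_mod26 ((c.toNat : Int) - 65 + a)
    set m := PySem.Int.mod ((c.toNat : Int) - 65 + a) 26 with hmdef
    have hup := pv_isupper_ofNat (m + 65).toNat (by omega) (by omega)
    rw [hup, if_pos rfl, pv_toNat_ofNat _ (by omega)]
    congr 2
    have h1 : (((m + 65).toNat : Int)) = m + 65 := Int.toNat_of_nonneg (by omega)
    rw [h1, hmdef]
    rw [PySem.Int.mod_eq_emod_of_pos (by norm_num), PySem.Int.mod_eq_emod_of_pos (by norm_num),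
        PySem.Int.mod_eq_emod_of_pos (by norm_num)]
    omega
  · simp only [Bool.not_eq_true] at h
    simp only [h, Bool.false_eq_true, if_false]
    have hm := pv_mod26 ((c.toNat : Int) - 97 + a)
    set m := PySem.Int.mod ((c.toNat : Int) - 97 + a) 26 with hmdef
    have hlo := pv_islower_ofNat (m + 97).toNat (by omega) (by omega)
    rw [hlo, if_neg (by simp), pv_toNat_ofNat _ (by omega)]
    congr 2
    have h1 : (((m + 97).toNat : Int)) = m + 97 := Int.toNat_of_nonneg (by omega)
    rw [h1, hmdef]
    rw [PySem.Int.mod_eq_emod_of_pos (by norm_num), PySem.Int.mod_eq_emod_of_pos (by norm_num),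
        PySem.Int.mod_eq_emod_of_pos (by norm_num)]
    omega

-- A's per-char transform is the same rotation
theorem pvShiftChar_eq_rot (c : Char) (s : Int) : pvShiftChar c s = pvRot c s := by
  unfold pvShiftChar pvRot
  have h1 : (c.toNat : Int) + s - 65 = (c.toNat : Int) - 65 + s := by ring
  have h2 : (c.toNat : Int) + s - 97 = (c.toNat : Int) - 97 + s := by ring
  rw [h1, h2]

-- enumerate of a mapped list
theorem pv_enumerate_map {α β : Type} (f : α → β) (l : List α) (s : Int) :
    PySem.List.enumerate (l.map f) s = (PySem.List.enumerate l s).map (fun p => (p.1, f p.2)) := by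
  induction l generalizing s with
  | nil => simp [PySem.List.enumerate_nil]
  | cons x l ih => simp [PySem.List.enumerate_cons, ih]

theorem pvLineP_zero (cs : List Char) (v : Int) :
    cs.map (fun c => pvRot c v) = pvLineP cs v 0 := by
  unfold pvLineP
  conv_lhs => rw [← PySem.List.map_snd_enumerate cs 0]
  rw [List.map_map]
  apply List.map_congr_left
  intro p _
  simp

-- A's inner loop, characterized
theorem pv_inner (cs : List Char) (s : Int) (acc : List Char) (v d : Int) :
    cs.foldl (fun (st2 : List Char × Int) c => (st2.1 ++ [pvShiftChar c st2.2], st2.2 + d)) (acc, v)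
    = (acc ++ (PySem.List.enumerate cs s).map (fun p => pvShiftChar p.2 (v + d * (p.1 - s))),
       v + d * cs.length) := by
  induction cs generalizing s acc v with
  | nil => simp [PySem.List.enumerate_nil]
  | cons c cs ih =>
    simp only [List.foldl_cons, PySem.List.enumerate_cons, List.map_cons, List.length_cons]
    rw [ih (s+1)]
    simp only [Prod.mk.injEq]
    refine ⟨?_, ?_⟩
    · simp only [sub_self, mul_zero, add_zero, List.append_assoc, List.singleton_append]
      congr 1
      congr 1
      apply List.map_congr_left
      intro p _
      congr 1
      ring
    · push_cast
      ring

theorem pv_inner_zero (cs : List Char) (acc : List Char) (v d : Int) :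
    cs.foldl (fun (st2 : List Char × Int) c => (st2.1 ++ [pvShiftChar c st2.2], st2.2 + d)) (acc, v)
    = (acc ++ pvLineP cs v d, v + d * cs.length) := by
  rw [pv_inner cs 0 acc v d]
  unfold pvLineP
  congr 1
  congr 1
  apply List.map_congr_left
  intro p _
  rw [pvShiftChar_eq_rot]
  congr 1
  ring

-- A's outer 26-row loop, characterized
theorem pv_outer (l : List Nat) (cs : List Char) (v : Int) (dec : Bool) (acc : List Char) (k : Int) :
    l.foldl (fun (st : List Char × Int) _ =>
      let inner := cs.foldl (fun (st2 : List Char × Int) c =>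
        (st2.1 ++ [pvShiftChar c st2.2], if dec then st2.2 + (-st.2) else st2.2 + st.2)) (st.1, v)
      (inner.1 ++ ['\n'], st.2 + 1)) (acc, k)
    = (acc ++ pvRowsP cs v (if dec then -1 else 1) k l.length, k + l.length) := by
  induction l generalizing acc k with
  | nil => simp [pvRowsP]
  | cons x l ih =>
    simp only [List.foldl_cons]
    have hfun : (fun (st2 : List Char × Int) c =>
        (st2.1 ++ [pvShiftChar c st2.2], if dec then st2.2 + (-k) else st2.2 + k))
        = (fun (st2 : List Char × Int) c =>
        (st2.1 ++ [pvShiftChar c st2.2], st2.2 + (if dec then -1 else 1) * k)) := by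
      funext st2 c
      by_cases h : dec <;> simp [h]
    simp only [hfun, pv_inner_zero]
    rw [ih]
    simp only [pvRowsP, List.length_cons, List.append_assoc, Prod.mk.injEq]
    exact ⟨trivial, by push_cast; ring⟩

-- enumerating an enumeration pairs each element with its own index
theorem pv_enum_enum {α : Type} (cs : List α) (s : Int) :
    PySem.List.enumerate (PySem.List.enumerate cs s) s
    = (PySem.List.enumerate cs s).map (fun p => (p.1, p)) := by
  induction cs generalizing s with
  | nil => simp [PySem.List.enumerate_nil]
  | cons x l ih => simp [PySem.List.enumerate_cons, ih]

-- applying a per-index rotation to an already rotated line composes the shifts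
theorem pv_staged (cs : List Char) (v : Int) (f : Int → Int) :
    (PySem.List.enumerate (cs.map (fun c => pvRot c v))).map (fun p => pvRot p.2 (f p.1))
    = (PySem.List.enumerate cs).map (fun p => pvRot p.2 (v + f p.1)) := by
  rw [pv_enumerate_map]
  rw [List.map_map]
  apply List.map_congr_left
  intro p _
  simp only [Function.comp_apply]
  rw [pvRot_comp]

-- B's row update steps pvLineP's row index
theorem pv_row_update (cs : List Char) (v sign r : Int) :
    (PySem.List.enumerate (pvLineP cs v (sign * r))).map (fun p => pvRot p.2 (sign * p.1))
    = pvLineP cs v (sign * (r + 1)) := by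
  unfold pvLineP
  rw [pv_enumerate_map, pv_enum_enum, List.map_map, List.map_map]
  apply List.map_congr_left
  intro p _
  simp only [Function.comp_apply]
  rw [pvRot_comp]
  congr 1
  ring

-- B's outer fold, characterized
theorem pv_b_fold (cs : List Char) (v sign : Int) (l : List Nat) (acc : List Char) (r : Int) :
    l.foldl (fun (st : List Char × List Char) _ =>
      (st.1 ++ st.2 ++ ['\n'],
       (PySem.List.enumerate st.2).map (fun p => pvRot p.2 (sign * p.1))))
      (acc, pvLineP cs v (sign * r))
    = (acc ++ pvRowsP cs v sign r l.length, pvLineP cs v (sign * (r + l.length))) := by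
  induction l generalizing acc r with
  | nil => simp [pvRowsP]
  | cons x l ih =>
    simp only [List.foldl_cons]
    rw [pv_row_update, ih]
    simp only [pvRowsP, List.length_cons, List.append_assoc, Prod.mk.injEq]
    refine ⟨trivial, ?_⟩
    congr 1
    push_cast
    ring

-- ===== VERDICT (by name: the statement is the Claim_ definition above) =====
theorem caeserrek_spec : Claim_equal_caeserrek := by
  intro original verschiebung rekursion decryptrekursion _
  unfold Spec_caeserrek caeserrek caeserrek_alt
  by_cases h0 : rekursion = some 0
  · simp only [h0, reduceIte]
    rw [pv_outer (List.range 26) original.toList verschiebung decryptrekursion [] 0]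
    have hrow : original.toList.map (fun c => pvRot c verschiebung)
        = pvLineP original.toList verschiebung ((if decryptrekursion then (-1:Int) else 1) * 0) := by
      rw [mul_zero, pvLineP_zero]
    rw [hrow, pv_b_fold original.toList verschiebung (if decryptrekursion then -1 else 1)
        (List.range 26) [] 0]
  · simp only [if_neg h0]
    cases rekursion with
    | none =>
      have hfun : (fun (st2 : List Char × Int) c =>
          (st2.1 ++ [pvShiftChar c st2.2], st2.2))
          = (fun (st2 : List Char × Int) c =>
          (st2.1 ++ [pvShiftChar c st2.2], st2.2 + (0:Int))) := by
        funext st2 c; simp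
      rw [hfun, pv_inner_zero]
      simp only [List.nil_append]
      rw [pv_staged]
      unfold pvLineP
      rfl
    | some k =>
      cases decryptrekursion with
      | true =>
        have hfun : (fun (st2 : List Char × Int) c =>
            (st2.1 ++ [pvShiftChar c st2.2], if true = true then st2.2 + (-k) else st2.2 + k))
            = (fun (st2 : List Char × Int) c =>
            (st2.1 ++ [pvShiftChar c st2.2], st2.2 + (-k))) := by
          funext st2 c; simp
        rw [hfun, pv_inner_zero]
        simp only [List.nil_append]
        rw [pv_staged]
        unfold pvLineP
        simp
      | false =>
        have hfun : (fun (st2 : List Char × Int) c =>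
            (st2.1 ++ [pvShiftChar c st2.2], if false = true then st2.2 + (-k) else st2.2 + k))
            = (fun (st2 : List Char × Int) c =>
            (st2.1 ++ [pvShiftChar c st2.2], st2.2 + k)) := by
          funext st2 c; simp
        rw [hfun, pv_inner_zero]
        simp only [List.nil_append]
        rw [pv_staged]
        unfold pvLineP
        simp
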